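-- pv_equiv track=rewrite | github.com/joriener/ei-fragment-calculator | ei_fragment_calculator/confidence.py | _formula_sum_matches
-- ===== SOURCE A (Python) =====
-- def _formula_sum_matches(
--     comp_a: dict[str, int],
--     comp_b: dict[str, int],
--     parent_comp: dict[str, int],
-- ) -> bool:
--     """
--     Return True if comp_a + comp_b == parent_comp within ±2 H (rearrangements).
--     """
--     all_els = set(comp_a) | set(comp_b) | set(parent_comp)
--     combined = {el: comp_a.get(el, 0) + comp_b.get(el, 0) for el in all_els}
--     combined = {el: v for el, v in combined.items() if v != 0}
--     parent_clean = {el: v for el, v in parent_comp.items() if v != 0}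
--
--     if combined == parent_clean:
--         return True
--
--     for h_delta in (-2, -1, 1, 2):
--         adjusted = dict(parent_clean)
--         adjusted["H"] = adjusted.get("H", 0) + h_delta
--         adjusted = {el: v for el, v in adjusted.items() if v != 0}
--         if combined == adjusted:
--             return True
--
--     return False
-- ===== SOURCE B (Python) =====
-- def _formula_sum_matches(
--     comp_a: dict[str, int],
--     comp_b: dict[str, int],
--     parent_comp: dict[str, int],
-- ) -> bool:
--     """True iff comp_a + comp_b equals parent_comp element-wise, up to +-2 on H."""
--     els = set(comp_a) | set(comp_b) | set(parent_comp)
--     for el in els: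
--         if el != "H" and comp_a.get(el, 0) + comp_b.get(el, 0) != parent_comp.get(el, 0):
--             return False
--     d_h = comp_a.get("H", 0) + comp_b.get("H", 0) - parent_comp.get("H", 0)
--     return -2 <= d_h <= 2
-- ===== Notes on version B (the rewrite author's own statement) =====
-- stated objective: simpler
-- what changed: B replaces A's construction and order-insensitive comparison of filtered dicts against five H-shifted copies of the parent dict by a single element-wise pass: every non-H element must balance exactly and the signed H difference must lie in [-2, 2].
import Mathlib
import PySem

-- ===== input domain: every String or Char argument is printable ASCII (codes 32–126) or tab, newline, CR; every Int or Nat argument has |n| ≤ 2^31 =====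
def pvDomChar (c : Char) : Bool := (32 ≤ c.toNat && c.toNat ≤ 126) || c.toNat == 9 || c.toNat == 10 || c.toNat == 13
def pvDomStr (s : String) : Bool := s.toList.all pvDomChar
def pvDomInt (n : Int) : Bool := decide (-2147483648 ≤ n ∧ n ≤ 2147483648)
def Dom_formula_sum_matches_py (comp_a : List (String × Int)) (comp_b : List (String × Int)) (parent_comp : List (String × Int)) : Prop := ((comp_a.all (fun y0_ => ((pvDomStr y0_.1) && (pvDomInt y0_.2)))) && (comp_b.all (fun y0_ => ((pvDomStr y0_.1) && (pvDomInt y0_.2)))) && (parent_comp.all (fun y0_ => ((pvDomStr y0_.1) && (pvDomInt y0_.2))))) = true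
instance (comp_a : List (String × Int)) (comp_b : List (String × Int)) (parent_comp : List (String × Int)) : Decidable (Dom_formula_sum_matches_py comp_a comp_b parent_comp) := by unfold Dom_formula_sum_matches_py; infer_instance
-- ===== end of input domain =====

-- B replaces A's enumeration of five H-shifted copies of the parent dict by a single
-- element-wise difference check (objective: simpler); return values agree on assoc lists
-- with pairwise-distinct keys — the only lists that represent a Python dict.

-- ===== PORT A =====
-- `{el: v for el, v in l if v != 0}`, built pair by pair
def pyFilterNZ (l : List (String × Int)) : PySem.Dict String Int :=
  l.foldl (fun acc p => if p.2 ≠ 0 then acc.insert p.1 p.2 else acc) PySem.Dict.empty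

-- Python dict `==` (order-insensitive): same keys and the same value at each key
def pyDictEq (d e : PySem.Dict String Int) : Bool :=
  d.keys.all (fun k => d.get? k == e.get? k) && e.keys.all (fun k => e.get? k == d.get? k)

def formula_sum_matches_py (comp_a : List (String × Int)) (comp_b : List (String × Int)) (parent_comp : List (String × Int)) : Bool :=
  let da : PySem.Dict String Int := PySem.Dict.mk comp_a
  let db : PySem.Dict String Int := PySem.Dict.mk comp_b
  let dp : PySem.Dict String Int := PySem.Dict.mk parent_comp
  let all_els : PySem.Set String :=
    ((PySem.Set.ofList da.keys).union (PySem.Set.ofList db.keys)).union (PySem.Set.ofList dp.keys)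
  let combined0 : PySem.Dict String Int :=
    all_els.foldl (fun d el => d.insert el (da.getD el 0 + db.getD el 0)) PySem.Dict.empty
  let combined := pyFilterNZ combined0.items
  let parent_clean := pyFilterNZ dp.items
  if pyDictEq combined parent_clean then true
  else
    ([-2, -1, 1, 2] : List Int).any (fun h_delta =>
      let adjusted := parent_clean.insert "H" (parent_clean.getD "H" 0 + h_delta)
      let adjusted2 := pyFilterNZ adjusted.items
      pyDictEq combined adjusted2)

-- ===== PORT B =====
def formula_sum_matches_py_alt (comp_a : List (String × Int)) (comp_b : List (String × Int)) (parent_comp : List (String × Int)) : Bool :=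
  let da : PySem.Dict String Int := PySem.Dict.mk comp_a
  let db : PySem.Dict String Int := PySem.Dict.mk comp_b
  let dp : PySem.Dict String Int := PySem.Dict.mk parent_comp
  let els : PySem.Set String :=
    ((PySem.Set.ofList da.keys).union (PySem.Set.ofList db.keys)).union (PySem.Set.ofList dp.keys)
  if els.any (fun el => decide (el ≠ "H") && !(da.getD el 0 + db.getD el 0 == dp.getD el 0)) then
    false
  else
    let d_h := da.getD "H" 0 + db.getD "H" 0 - dp.getD "H" 0
    decide (-2 ≤ d_h ∧ d_h ≤ 2)

-- ===== PRECONDITION & SPEC =====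
-- Pre_ requires the parent assoc list to have pairwise-distinct keys: a list with a duplicate
-- key does not represent any Python dict value, so A is never called on one (comp_a and comp_b
-- need no such restriction: both ports read them only through first-match lookups).
def Pre_formula_sum_matches_py (comp_a : List (String × Int)) (comp_b : List (String × Int)) (parent_comp : List (String × Int)) : Prop :=
  (parent_comp.map Prod.fst).Nodup
instance (comp_a : List (String × Int)) (comp_b : List (String × Int)) (parent_comp : List (String × Int)) : Decidable (Pre_formula_sum_matches_py comp_a comp_b parent_comp) := by unfold Pre_formula_sum_matches_py; infer_instance

def pvWitness_formula_sum_matches_py : (List (String × Int)) × (List (String × Int)) × (List (String × Int)) :=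
  ([("H", 2)], [("C", 1)], [("C", 1), ("H", 2)])

def Spec_formula_sum_matches_py (comp_a : List (String × Int)) (comp_b : List (String × Int)) (parent_comp : List (String × Int)) (out : Bool) : Prop := out = formula_sum_matches_py_alt comp_a comp_b parent_comp
instance (comp_a : List (String × Int)) (comp_b : List (String × Int)) (parent_comp : List (String × Int)) (out : Bool) : Decidable (Spec_formula_sum_matches_py comp_a comp_b parent_comp out) := by unfold Spec_formula_sum_matches_py; infer_instance

-- ===== CLAIM (what is proved, stated in full; the proofs are below) =====
def Claim_equal_formula_sum_matches_py : Prop := ∀ (comp_a : List (String × Int)) (comp_b : List (String × Int)) (parent_comp : List (String × Int)), Dom_formula_sum_matches_py comp_a comp_b parent_comp → Pre_formula_sum_matches_py comp_a comp_b parent_comp → Spec_formula_sum_matches_py comp_a comp_b parent_comp (formula_sum_matches_py comp_a comp_b parent_comp)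

-- ===== LEMMAS AND PROOFS =====

lemma filterNZ_absent (l : List (String × Int)) (acc : PySem.Dict String Int) (k : String)
    (h : ∀ p ∈ l, p.1 ≠ k) :
    (l.foldl (fun acc p => if p.2 ≠ 0 then acc.insert p.1 p.2 else acc) acc).get? k = acc.get? k := by
  induction l generalizing acc with
  | nil => rfl
  | cons p t ih =>
    have hp : p.1 ≠ k := h p (by simp)
    have ht : ∀ q ∈ t, q.1 ≠ k := fun q hq => h q (by simp [hq])
    rw [List.foldl_cons, ih _ ht]
    by_cases hz : p.2 ≠ 0
    · simp only [if_pos hz, PySem.Dict.get?_insert]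
      rw [if_neg (Ne.symm hp)]
    · simp [hz]

lemma filterNZ_foldl_get? (l : List (String × Int)) (acc : PySem.Dict String Int) (k : String)
    (hn : (l.map Prod.fst).Nodup) :
    (l.foldl (fun acc p => if p.2 ≠ 0 then acc.insert p.1 p.2 else acc) acc).get? k =
      match (PySem.Dict.mk l).get? k with
      | some v => if v = 0 then acc.get? k else some v
      | none => acc.get? k := by
  induction l generalizing acc with
  | nil => simp [PySem.Dict.get?]
  | cons p t ih =>
    simp only [List.map_cons, List.nodup_cons] at hn
    obtain ⟨hp, hnt⟩ := hn
    rw [List.foldl_cons]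
    by_cases hk : p.1 = k
    · subst hk
      have ht : ∀ q ∈ t, q.1 ≠ p.1 := by
        intro q hq heq
        exact hp (heq ▸ List.mem_map_of_mem hq)
      rw [filterNZ_absent t _ _ ht]
      rw [show (PySem.Dict.mk ((p.1, p.2) :: t)) = PySem.Dict.mk (p :: t) from rfl] at *
      rw [← Prod.mk.eta (p := p), PySem.Dict.get?_mk_cons]
      simp only [BEq.rfl, if_pos]
      by_cases hz : p.2 = 0
      · simp [hz]
      · simp [hz]
    · have : (if p.2 ≠ 0 then acc.insert p.1 p.2 else acc).get? k = acc.get? k := by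
        by_cases hz : p.2 ≠ 0
        · simp [hz, PySem.Dict.get?_insert, Ne.symm hk]
        · simp [hz]
      rw [ih _ hnt]
      rw [← Prod.mk.eta (p := p), PySem.Dict.get?_mk_cons]
      have : (p.1 == k) = false := by simp [hk]
      rcases hx : (PySem.Dict.mk t).get? k with _ | v <;> simp_all

lemma pyFilterNZ_get? (d : PySem.Dict String Int) (hn : d.keys.Nodup) (k : String) :
    (pyFilterNZ d.items).get? k = if d.getD k 0 = 0 then none else some (d.getD k 0) := by
  obtain ⟨l⟩ := d
  have hn' : (l.map Prod.fst).Nodup := hn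
  rw [pyFilterNZ, filterNZ_foldl_get? l _ k hn']
  rw [PySem.Dict.getD_eq_get?_getD]
  rcases hx : (PySem.Dict.mk l).get? k with _ | v
  · simp
  · by_cases hv : v = 0 <;> simp [hv, PySem.Dict.get?_empty]

lemma pyFilterNZ_nodup_keys (l : List (String × Int)) : (pyFilterNZ l).keys.Nodup := by
  rw [pyFilterNZ]
  have : ∀ (acc : PySem.Dict String Int), acc.keys.Nodup →
      (l.foldl (fun acc p => if p.2 ≠ 0 then acc.insert p.1 p.2 else acc) acc).keys.Nodup := by
    induction l with
    | nil => intro acc h; exact h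
    | cons p t ih =>
      intro acc h
      rw [List.foldl_cons]
      apply ih
      by_cases hz : p.2 ≠ 0
      · simpa [hz] using PySem.Dict.nodup_keys_insert acc p.1 p.2 h
      · simpa [hz] using h
  exact this _ (by simp [PySem.Dict.empty, PySem.Dict.keys])

lemma pyDictEq_iff (d e : PySem.Dict String Int) :
    pyDictEq d e = true ↔ ∀ k, d.get? k = e.get? k := by
  constructor
  · intro h k
    rw [pyDictEq, Bool.and_eq_true, List.all_eq_true, List.all_eq_true] at h
    by_cases hd : k ∈ d.keys
    · simpa using h.1 k hd
    · by_cases he : k ∈ e.keys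
      · have := h.2 k he
        simp at this
        exact this.symm
      · rw [(PySem.Dict.get?_eq_none_iff_not_mem_keys d k).2 hd,
            (PySem.Dict.get?_eq_none_iff_not_mem_keys e k).2 he]
  · intro h
    rw [pyDictEq, Bool.and_eq_true, List.all_eq_true, List.all_eq_true]
    exact ⟨fun k _ => by simp [h k], fun k _ => by simp [h k]⟩

lemma mk_getD_zero_of_not_mem (l : List (String × Int)) (k : String)
    (h : k ∉ l.map Prod.fst) : (PySem.Dict.mk l).getD k 0 = 0 := by
  apply PySem.Dict.getD_of_not_contains
  rw [← Bool.not_eq_true, PySem.Dict.contains_iff_mem_keys]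
  exact h

-- the if-encoding "zero ↦ absent" is injective
lemma optEnc_inj (x y : Int) :
    ((if x = 0 then none else some x) = (if y = 0 then (none : Option Int) else some y)) ↔ x = y := by
  by_cases hx : x = 0 <;> by_cases hy : y = 0 <;> simp [hx, hy] <;> omega

theorem ports_agree (a b p : List (String × Int)) (hp : (p.map Prod.fst).Nodup) :
    formula_sum_matches_py a b p = formula_sum_matches_py_alt a b p := by
  -- abbreviations
  set da : PySem.Dict String Int := PySem.Dict.mk a with hda
  set db : PySem.Dict String Int := PySem.Dict.mk b with hdb
  set dp : PySem.Dict String Int := PySem.Dict.mk p with hdp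
  set fab : String → Int := fun k => da.getD k 0 + db.getD k 0 with hfab
  set g : String → Int := fun k => dp.getD k 0 with hg
  set all_els : PySem.Set String :=
    ((PySem.Set.ofList da.keys).union (PySem.Set.ofList db.keys)).union (PySem.Set.ofList dp.keys) with hae
  have hAEnd : all_els.Nodup :=
    PySem.Set.nodup_union _ _ (PySem.Set.nodup_union _ _ (PySem.Set.nodup_ofList _))
  have hmem : ∀ k, k ∈ all_els ↔ k ∈ a.map Prod.fst ∨ k ∈ b.map Prod.fst ∨ k ∈ p.map Prod.fst := by
    intro k
    rw [hae, PySem.Set.mem_union, PySem.Set.mem_union, PySem.Set.mem_ofList,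
        PySem.Set.mem_ofList, PySem.Set.mem_ofList]
    tauto
  have hnotmem : ∀ k, k ∉ all_els → fab k = 0 ∧ g k = 0 := by
    intro k hk
    rw [hmem] at hk
    push Not at hk
    constructor
    · show da.getD k 0 + db.getD k 0 = 0
      rw [hda, hdb, mk_getD_zero_of_not_mem _ _ hk.1, mk_getD_zero_of_not_mem _ _ hk.2.1]
      norm_num
    · show dp.getD k 0 = 0
      rw [hdp]
      exact mk_getD_zero_of_not_mem _ _ hk.2.2
  set combined0 : PySem.Dict String Int :=
    all_els.foldl (fun d el => d.insert el (da.getD el 0 + db.getD el 0)) PySem.Dict.empty with hc0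
  have hitems0 : combined0.items = all_els.map (fun el => (el, fab el)) := by
    rw [hc0, PySem.Dict.items_foldl_insert_fresh all_els (fun el => el) (fun el => fab el)
          PySem.Dict.empty (fun x _ => PySem.Dict.contains_empty x) (by simpa using hAEnd)]
    rfl
  have hkeys0 : combined0.keys = all_els := by
    rw [PySem.Dict.keys, hitems0, List.map_map]
    simp [Function.comp_def]
  have hnd0 : combined0.keys.Nodup := by rw [hkeys0]; exact hAEnd
  have hgd0 : ∀ k, combined0.getD k 0 = fab k := by
    intro k
    by_cases hk : k ∈ all_els
    · exact PySem.Dict.getD_of_mem_items combined0 (by rw [hitems0]; exact List.mem_map_of_mem hk) hnd0 0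
    · rw [PySem.Dict.getD_of_not_contains _ 0
            (by rw [← Bool.not_eq_true, PySem.Dict.contains_iff_mem_keys, hkeys0]; exact hk)]
      exact ((hnotmem k hk).1).symm
  have hcomb : ∀ k, (pyFilterNZ combined0.items).get? k
      = if fab k = 0 then none else some (fab k) := by
    intro k; rw [pyFilterNZ_get? combined0 hnd0 k, hgd0]
  have hpc : ∀ k, (pyFilterNZ dp.items).get? k = if g k = 0 then none else some (g k) := by
    intro k; exact pyFilterNZ_get? dp hp k
  have hpcD : ∀ k, (pyFilterNZ dp.items).getD k 0 = g k := by
    intro k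
    rw [PySem.Dict.getD_eq_get?_getD, hpc k]
    split_ifs with h <;> simp [h]
  have hpcnd : (pyFilterNZ dp.items).keys.Nodup := pyFilterNZ_nodup_keys _
  -- characterisation of each dict comparison
  have heq0 : (pyDictEq (pyFilterNZ combined0.items) (pyFilterNZ dp.items) = true)
      ↔ ∀ k, fab k = g k := by
    rw [pyDictEq_iff]
    constructor
    · intro h k; have := h k; rw [hcomb, hpc] at this; exact (optEnc_inj _ _).1 this
    · intro h k; rw [hcomb, hpc, h]
  have heqH : ∀ h_delta : Int,
      (pyDictEq (pyFilterNZ combined0.items)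
        (pyFilterNZ ((pyFilterNZ dp.items).insert "H"
          ((pyFilterNZ dp.items).getD "H" 0 + h_delta)).items) = true)
      ↔ ∀ k, fab k = if k = "H" then g "H" + h_delta else g k := by
    intro h_delta
    have hnd' := PySem.Dict.nodup_keys_insert _ "H" ((pyFilterNZ dp.items).getD "H" 0 + h_delta) hpcnd
    have hD : ∀ k, ((pyFilterNZ dp.items).insert "H"
        ((pyFilterNZ dp.items).getD "H" 0 + h_delta)).getD k 0
        = if k = "H" then g "H" + h_delta else g k := by
      intro k
      rw [PySem.Dict.getD_insert, hpcD, hpcD]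
    rw [pyDictEq_iff]
    constructor
    · intro h k
      have := h k
      rw [hcomb, pyFilterNZ_get? _ hnd', hD] at this
      exact (optEnc_inj _ _).1 this
    · intro h k
      rw [hcomb, pyFilterNZ_get? _ hnd', hD, h]
  -- characterisation of A
  have hAiff : formula_sum_matches_py a b p = true ↔
      ((∀ k, fab k = g k) ∨ ∃ h_delta ∈ ([-2, -1, 1, 2] : List Int),
        ∀ k, fab k = if k = "H" then g "H" + h_delta else g k) := by
    rw [formula_sum_matches_py]
    simp only [← hda, ← hdb, ← hdp, ← hae, ← hc0]
    by_cases h0 : pyDictEq (pyFilterNZ combined0.items) (pyFilterNZ dp.items) = true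
    · rw [if_pos h0]
      simp only [true_iff]
      exact Or.inl (heq0.1 h0)
    · rw [if_neg h0]
      simp only [List.any_eq_true]
      constructor
      · rintro ⟨h_delta, hm, hh⟩
        exact Or.inr ⟨h_delta, hm, (heqH h_delta).1 hh⟩
      · rintro (hl | ⟨h_delta, hm, hh⟩)
        · exact absurd (heq0.2 hl) h0
        · exact ⟨h_delta, hm, (heqH h_delta).2 hh⟩
  -- characterisation of B
  have hBiff : formula_sum_matches_py_alt a b p = true ↔
      ((∀ k, k ≠ "H" → fab k = g k) ∧ -2 ≤ fab "H" - g "H" ∧ fab "H" - g "H" ≤ 2) := by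
    rw [formula_sum_matches_py_alt]
    simp only [← hda, ← hdb, ← hdp, ← hae]
    by_cases hany : (all_els.any
        fun el => decide (el ≠ "H") && !(da.getD el 0 + db.getD el 0 == dp.getD el 0)) = true
    · rw [if_pos hany]
      simp only [Bool.false_eq_true, false_iff]
      rw [List.any_eq_true] at hany
      obtain ⟨k, hk, hpred⟩ := hany
      simp only [Bool.and_eq_true, decide_eq_true_eq, Bool.not_eq_true', beq_eq_false_iff_ne] at hpred
      rintro ⟨hall, -⟩
      exact hpred.2 (hall k hpred.1)
    · rw [if_neg hany]
      rw [decide_eq_true_eq]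
      rw [Bool.not_eq_true] at hany
      rw [List.any_eq_false] at hany
      constructor
      · rintro ⟨h1, h2⟩
        refine ⟨fun k hk => ?_, h1, h2⟩
        by_cases hkm : k ∈ all_els
        · have hone := hany k hkm
          simpa [hk] using hone
        · have := hnotmem k hkm
          omega
      · rintro ⟨-, h1, h2⟩
        exact ⟨h1, h2⟩
  -- assemble
  rw [Bool.eq_iff_iff, hAiff, hBiff]
  constructor
  · rintro (hl | ⟨h_delta, hm, hh⟩)
    · exact ⟨fun k _ => hl k, by rw [hl "H"]; omega⟩
    · have hm' : h_delta = -2 ∨ h_delta = -1 ∨ h_delta = 1 ∨ h_delta = 2 := by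
        simpa using hm
      refine ⟨fun k hk => by rw [hh k, if_neg hk], ?_⟩
      have := hh "H"
      rw [if_pos rfl] at this
      omega
  · rintro ⟨hall, h1, h2⟩
    by_cases hz : fab "H" - g "H" = 0
    · left
      intro k
      by_cases hk : k = "H"
      · subst hk; omega
      · exact hall k hk
    · refine Or.inr ⟨fab "H" - g "H", by simp; omega, fun k => ?_⟩
      by_cases hk : k = "H"
      · subst hk; rw [if_pos rfl]; omega
      · rw [if_neg hk]; exact hall k hk

-- ===== VERDICT (by name: the statement is the Claim_ definition above) =====
theorem formula_sum_matches_py_spec : Claim_equal_formula_sum_matches_py := by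
  intro comp_a comp_b parent_comp _ hpre
  unfold Spec_formula_sum_matches_py
  exact ports_agree comp_a comp_b parent_comp hpre
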